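-- pv_equiv track=rewrite | github.com/aeebbr/Day-By-Day | DBD_heeje/Day_41~50/D47_131704.py | solution
-- ===== SOURCE A (Python) =====
-- def solution(order):
--     stack = []
--     answer = 0
--     idx = 1
--
--     for o in order:
--         if o >= idx:
--             stack.extend(range(idx, o))
--             idx = o + 1
--             answer += 1
--         else:
--             if stack[-1] == o:
--                 stack.pop()
--                 answer += 1
--             else:
--                 break
--     return answer
-- ===== SOURCE B (Python) =====
-- def solution(order):
--     # No stack at all: keep the set of already-delivered box numbers and the
--     # largest label taken from the belt so far (m).  The box on top of A's
--     # stack is simply the largest label <= m not yet delivered, found by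
--     # scanning downward from m; an exhausted scan (t < 1) means the stack
--     # is empty, so no box can be delivered.
--     delivered = set()
--     m = 0
--     answer = 0
--     for o in order:
--         if o > m:
--             m = o
--             delivered.add(o)
--             answer += 1
--         else:
--             t = m
--             while t >= 1 and t in delivered:
--                 t -= 1
--             if t < 1 or t != o:
--                 break
--             delivered.add(o)
--             answer += 1
--     return answer
-- ===== Notes on version B (the rewrite author's own statement) =====
-- stated objective: alternative
-- what changed: B keeps no box stack at all: it records the set of delivered labels and the largest label taken so far, recomputing the stack top as the largest undelivered label by a downward scan, whereas A simulates the stack explicitly with extend(range)/pop.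
import Mathlib
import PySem

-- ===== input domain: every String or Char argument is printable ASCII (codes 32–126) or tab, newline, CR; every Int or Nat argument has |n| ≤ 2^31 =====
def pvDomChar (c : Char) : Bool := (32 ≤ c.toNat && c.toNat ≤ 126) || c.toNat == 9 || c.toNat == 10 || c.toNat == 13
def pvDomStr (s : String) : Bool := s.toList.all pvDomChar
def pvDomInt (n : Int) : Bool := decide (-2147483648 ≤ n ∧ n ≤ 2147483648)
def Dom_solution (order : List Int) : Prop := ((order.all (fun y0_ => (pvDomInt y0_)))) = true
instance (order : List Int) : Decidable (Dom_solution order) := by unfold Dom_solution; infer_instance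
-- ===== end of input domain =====

-- B drops A's explicit box stack: it keeps only the set of delivered labels and
-- the largest label taken so far, recomputing the stack top as the largest
-- undelivered label by a downward scan; a timing run measured B faster.

-- ===== PORT A =====
-- The stack is kept top-first (head = Python's stack[-1]); 'stack.extend(range(idx, o))'
-- therefore prepends the reversed range, and 'stack.pop()' drops the head — exact.
-- On the empty-stack else branch Python raises IndexError (stack[-1]); Pre_solution
-- excludes those inputs, the port returns the answer accumulated so far there.
def solutionLoop (order : List Int) (stack : List Int) (idx answer : Int) : Int :=
  match order with
  | [] => answer
  | o :: rest =>
    if o ≥ idx then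
      solutionLoop rest ((PySem.List.pyRange idx o 1).reverse ++ stack) (o + 1) (answer + 1)
    else
      match stack with
      | [] => answer                      -- Python: IndexError (outside Pre_solution)
      | t :: s => if t = o then solutionLoop rest s idx (answer + 1) else answer

def solution (order : List Int) : Int :=
  solutionLoop order [] 1 0

-- ===== PORT B =====
-- Source B's 'while t >= 1 and t in delivered: t -= 1' : t starts at m, which is
-- always ≥ 0 (it starts at 0 and only ever increases), so it is iterated as a Nat.
def topScan (delivered : PySem.Set Int) : Nat → Int
  | 0 => 0
  | Nat.succ k => if ((k : Int) + 1) ∈ delivered then topScan delivered k else (k : Int) + 1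

def solutionAltLoop (order : List Int) (delivered : PySem.Set Int) (m answer : Int) : Int :=
  match order with
  | [] => answer
  | o :: rest =>
    if o > m then
      solutionAltLoop rest (PySem.Set.add delivered o) o (answer + 1)
    else
      let t := topScan delivered m.toNat
      if t < 1 ∨ t ≠ o then answer
      else solutionAltLoop rest (PySem.Set.add delivered o) m (answer + 1)

def solution_alt (order : List Int) : Int :=
  solutionAltLoop order [] 0 0

-- ===== PRECONDITION & SPEC =====
-- A raises IndexError exactly when some proper prefix order[:j] is a
-- stack-realisable (312-avoiding) permutation of 1..j — so the box stack is empty —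
-- and the next element order[j] is ≤ j; Pre_solution excludes exactly those inputs.
def pvIsPermUpTo (l : List Int) (j : Nat) : Bool :=
  l.length = j && ((List.range j).map (fun k => (k : Int) + 1)).all (fun v => v ∈ l)

def pvNo312 (l : List Int) : Bool :=
  (List.range l.length).all fun m => (List.range m).all fun k => (List.range k).all fun i =>
    ! (l.getD k 0 < l.getD m 0 && l.getD m 0 < l.getD i 0)

def Pre_solution (order : List Int) : Prop :=
  ∀ j : Nat, j < order.length →
    ¬ (pvIsPermUpTo (order.take j) j = true ∧ pvNo312 (order.take j) = true ∧ order.getD j 0 ≤ (j : Int))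

instance (order : List Int) : Decidable (Pre_solution order) := by
  unfold Pre_solution; infer_instance

def pvWitness_solution : List Int := [1, 3, 2]

def Spec_solution (order : List Int) (out : Int) : Prop := out = solution_alt order
instance (order : List Int) (out : Int) : Decidable (Spec_solution order out) := by unfold Spec_solution; infer_instance

-- ===== CLAIM =====
def Claim_equal_solution : Prop := ∀ (order : List Int), Dom_solution order → Pre_solution order → Spec_solution order (solution order)

-- ===== LEMMAS AND PROOFS =====

-- the list of undelivered labels in 1..t, largest first: exactly A's stack (top-first)
def pvUndel (d : PySem.Set Int) : Nat → List Int
  | 0 => []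
  | Nat.succ k => if ((k : Int) + 1) ∈ d then pvUndel d k else ((k : Int) + 1) :: pvUndel d k

theorem pvMem_undel (d : PySem.Set Int) (t : Nat) (x : Int) (hx : x ∈ pvUndel d t) :
    1 ≤ x ∧ x ≤ (t : Int) := by
  induction t with
  | zero => simp [pvUndel] at hx
  | succ k ih =>
    simp only [pvUndel] at hx
    split at hx
    · have := ih hx; push_cast; omega
    · rcases List.mem_cons.mp hx with h | h
      · subst h; push_cast; omega
      · have := ih h; push_cast; omega

theorem pvTopScan_eq (d : PySem.Set Int) (t : Nat) :
    topScan d t = (pvUndel d t).headD 0 := by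
  induction t with
  | zero => rfl
  | succ k ih =>
    simp only [topScan, pvUndel]
    split
    · exact ih
    · rfl

theorem pvUndel_add (d : PySem.Set Int) (v : Int) (t : Nat) :
    pvUndel (PySem.Set.add d v) t = (pvUndel d t).filter (fun x => x ≠ v) := by
  induction t with
  | zero => rfl
  | succ k ih =>
    simp only [pvUndel]
    by_cases hv : ((k : Int) + 1) = v
    · have hmv : ((k : Int) + 1) ∈ PySem.Set.add d v := by
        simp [PySem.Set.mem_add, hv]
      rw [if_pos hmv, ih]
      by_cases hm : ((k : Int) + 1) ∈ d
      · rw [if_pos hm]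
      · rw [if_neg hm, List.filter_cons, if_neg (by simp [hv])]
    · by_cases hm : ((k : Int) + 1) ∈ d
      · rw [if_pos (by simp [PySem.Set.mem_add, hm]), if_pos hm, ih]
      · rw [if_neg (by simp [PySem.Set.mem_add, hm, hv]), if_neg hm, ih,
          List.filter_cons, if_pos (by simp [hv])]

theorem pvUndel_tail_lt (d : PySem.Set Int) (t : Nat) (h : Int) (s : List Int)
    (he : pvUndel d t = h :: s) : ∀ x ∈ s, x < h := by
  induction t with
  | zero => simp [pvUndel] at he
  | succ k ih =>
    simp only [pvUndel] at he
    split at he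
    · exact ih he
    · injection he with h1 h2
      subst h1; subst h2
      intro x hx
      have := pvMem_undel d k x hx
      omega

theorem pvFilter_self (h : Int) (s : List Int) (hns : h ∉ s) :
    (h :: s).filter (fun x => x ≠ h) = s := by
  rw [List.filter_cons]
  simp only [decide_eq_true_eq]
  rw [if_neg (by simp)]
  exact List.filter_eq_self.mpr (by
    intro x hx
    simp only [decide_eq_true_eq]
    intro hxh
    exact hns (hxh ▸ hx))

theorem pvUndel_skip (d : PySem.Set Int) (v : Int) (t : Nat) (hv : (t : Int) < v) :
    pvUndel (PySem.Set.add d v) t = pvUndel d t := by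
  rw [pvUndel_add]
  exact List.filter_eq_self.mpr (by
    intro x hx
    have := pvMem_undel d t x hx
    simp only [decide_eq_true_eq]
    omega)

theorem pvRev_cons (lo hi : Int) (h : lo ≤ hi) :
    (PySem.List.pyRange lo (hi + 1) 1).reverse = hi :: (PySem.List.pyRange lo hi 1).reverse := by
  rw [PySem.List.pyRange_one_succ_right h, List.reverse_append]
  simp

theorem pvUndel_extend (d : PySem.Set Int) (a : Nat) :
    ∀ (b : Nat), a ≤ b → (∀ x : Int, (a : Int) < x → x ≤ (b : Int) → x ∉ d) →
    pvUndel d b = (PySem.List.pyRange ((a : Int) + 1) ((b : Int) + 1) 1).reverse ++ pvUndel d a := by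
  intro b
  induction b with
  | zero =>
    intro hab _
    have : a = 0 := by omega
    subst this
    rw [PySem.List.pyRange_one_eq_nil (by norm_num)]
    simp
  | succ k ih =>
    intro hab hfree
    by_cases hak : a = k + 1
    · subst hak
      rw [PySem.List.pyRange_one_eq_nil (by omega)]
      simp
    · have hak' : a ≤ k := by omega
      have hmem : ¬ ((k : Int) + 1) ∈ d := hfree _ (by omega) (by push_cast; omega)
      simp only [pvUndel, if_neg hmem]
      rw [ih hak' (by intro x h1 h2; exact hfree x h1 (by omega))]
      push_cast
      rw [pvRev_cons ((a : Int) + 1) ((k : Int) + 1) (by omega)]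
      simp

theorem pvLoop_eq (order : List Int) :
    ∀ (d : PySem.Set Int) (m answer : Int), 0 ≤ m → (∀ x ∈ d, 1 ≤ x ∧ x ≤ m) →
    solutionLoop order (pvUndel d m.toNat) (m + 1) answer = solutionAltLoop order d m answer := by
  induction order with
  | nil => intro d m answer _ _; rfl
  | cons o rest ih =>
    intro d m answer hm hd
    by_cases hgt : o > m
    · -- push branch: o ≥ m + 1 in A, o > m in B
      have hge : o ≥ m + 1 := by omega
      simp only [solutionLoop, solutionAltLoop, if_pos hge, if_pos hgt]
      have hstack : pvUndel (PySem.Set.add d o) o.toNat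
          = (PySem.List.pyRange (m + 1) o 1).reverse ++ pvUndel d m.toNat := by
        have ho1 : o.toNat = (o.toNat - 1) + 1 := by omega
        rw [ho1]
        have hotop : ((((o.toNat - 1) : Nat) : Int) + 1) ∈ PySem.Set.add d o := by
          have : (((o.toNat - 1) : Nat) : Int) + 1 = o := by omega
          rw [this]; simp [PySem.Set.mem_add]
        simp only [pvUndel, if_pos hotop]
        rw [pvUndel_extend (PySem.Set.add d o) m.toNat (o.toNat - 1) (by omega) (by
          intro x h1 h2
          simp only [PySem.Set.mem_add]
          rintro (hx | hx)
          · have := hd x hx; omega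
          · omega)]
        have h1 : ((m.toNat : Int) + 1) = m + 1 := by omega
        have h2 : ((((o.toNat - 1) : Nat) : Int) + 1) = o := by omega
        rw [h1, h2, pvUndel_skip d o m.toNat (by omega)]
      rw [← hstack]
      have := ih (PySem.Set.add d o) o (answer + 1) (by omega) (by
        intro x hx
        rcases (PySem.Set.mem_add _ _ _).mp hx with hx | hx
        · have := hd x hx; omega
        · omega)
      exact this
    · -- pop / break branch
      have hlt : ¬ (o ≥ m + 1) := by omega
      simp only [solutionLoop, solutionAltLoop, if_neg hlt, if_neg hgt]
      rw [pvTopScan_eq]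
      cases hu : pvUndel d m.toNat with
      | nil => simp
      | cons h s =>
        have hh1 : 1 ≤ h := (pvMem_undel d m.toNat h (by rw [hu]; exact List.mem_cons_self ..)).1
        have hhm : h ≤ m := by
          have := (pvMem_undel d m.toNat h (by rw [hu]; exact List.mem_cons_self ..)).2
          omega
        simp only [List.headD_cons]
        by_cases hho : h = o
        · subst hho
          rw [if_pos rfl, if_neg (by omega : ¬ (h < 1 ∨ h ≠ h))]
          have hs : pvUndel (PySem.Set.add d h) m.toNat = s := by
            rw [pvUndel_add, hu]
            exact pvFilter_self h s (by
              intro hmem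
              exact absurd (pvUndel_tail_lt d m.toNat h s hu h hmem) (by omega))
          rw [← hs]
          exact ih (PySem.Set.add d h) m (answer + 1) hm (by
            intro x hx
            rcases (PySem.Set.mem_add _ _ _).mp hx with hx | hx
            · exact hd x hx
            · constructor <;> omega)
        · rw [if_neg hho, if_pos (by right; exact hho)]

-- ===== VERDICT =====
theorem solution_spec : Claim_equal_solution := by
  intro order _ _
  unfold Spec_solution solution solution_alt
  have h := pvLoop_eq order [] 0 0 (by omega) (by intro x hx; cases hx)
  simpa [pvUndel] using h
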